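-- pv_equiv track=rewrite | github.com/minus9d/programming_contest_archive | abc/117/d/d.AC_but_wrong.py | solve
-- ===== SOURCE A (Python) =====
-- def func(As, x):
--     ans = 0
--     for a in As:
--         ans += a ^ x
--     return ans
--
-- def add_bit(bits, idx):
--     ret = bits[:]
--     ret[idx] = 1
--     return ret
--
-- def arr_to_num(arr):
--     num_str = ''.join([str(x) for x in arr])
--     return int(num_str, 2)
--
-- def solve(N, K, As):
--     if K == 0:
--         return func(As, 0)
--
--     best_x = 0
--     IDX_MAX = 42
--     idx = IDX_MAX
--     bits = [0] * (idx + 1)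
--     while idx >= 0:
--         if arr_to_num(add_bit(bits, IDX_MAX - idx)) > K:
--             pass
--         else:
--             one = 0
--             zero = 0
--             for a in As:
--                 if a & (1 << idx): one += 1
--                 else: zero += 1
--             if one >= zero:
--                 bits[IDX_MAX - idx] = 0
--             else:
--                 bits[IDX_MAX - idx] = 1
--         idx -= 1
--
--     best_x = arr_to_num(bits)
--     return func(As, best_x)
-- ===== SOURCE B (Python) =====
-- def solve(N, K, As):
--     n = len(As)
--     # which bit positions are worth setting: more elements have the bit clear than set
--     desired = [2 * sum(1 for a in As if a & (1 << b)) < n for b in range(43)]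
--     # pivot: highest bit of K that is set but not desired (tightness breaks there)
--     i = next((b for b in range(42, -1, -1)
--               if K // 2 ** b % 2 == 1 and not desired[b]), None)
--     if K <= 0:
--         x = 0
--     elif i is None:
--         x = K
--     else:
--         x = K // 2 ** (i + 1) * 2 ** (i + 1) + sum(2 ** b for b in range(i) if desired[b])
--     return sum(a ^ x for a in As)
-- ===== Notes on version B (the rewrite author's own statement) =====
-- stated objective: alternative
-- what changed: B replaces A's per-bit greedy loop (which re-encodes a 0/1 array through join+int(_,2) string parsing to test the budget at every bit) by a closed form: it tallies which bit positions are worth setting, locates the highest bit of K that is set but not worth taking (the pivot), and writes x directly as K truncated above the pivot plus all worthwhile bits below it.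
import Mathlib
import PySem

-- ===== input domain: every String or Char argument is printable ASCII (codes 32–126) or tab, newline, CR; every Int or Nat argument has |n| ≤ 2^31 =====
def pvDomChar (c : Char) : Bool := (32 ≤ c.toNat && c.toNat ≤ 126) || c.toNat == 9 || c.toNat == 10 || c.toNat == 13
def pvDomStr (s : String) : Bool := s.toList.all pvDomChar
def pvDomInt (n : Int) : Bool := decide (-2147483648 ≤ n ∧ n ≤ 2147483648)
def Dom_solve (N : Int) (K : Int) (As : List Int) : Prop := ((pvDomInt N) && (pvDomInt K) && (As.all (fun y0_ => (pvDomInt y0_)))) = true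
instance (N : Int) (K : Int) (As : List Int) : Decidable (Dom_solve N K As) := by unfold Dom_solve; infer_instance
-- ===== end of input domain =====

-- B replaces A's per-bit greedy loop (budget test by re-encoding a 0/1 array through
-- join+int(_,2) at every bit) by a closed form: it finds the highest bit of K that is set
-- but not worth taking ("pivot"), and writes x directly as K truncated above the pivot plus
-- every worthwhile bit below it; same cost class (the per-bit tally dominates both).

-- ===== PORT A =====
def func (As : List Int) (x : Int) : Int :=
  As.foldl (fun ans a => ans + PySem.Int.bxor a x) 0

-- ret = bits[:]; ret[idx] = 1  (the copy is value-level; idx is always in range here)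
def add_bit (bits : List Int) (idx : Int) : List Int :=
  PySem.List.pySetD bits idx 1

-- ''.join([str(x) for x in arr]) then int(num_str, 2); the base-2 parse is hand-ported as a
-- digit fold, exact here because every string this helper receives consists only of the
-- single characters '0'/'1' (no sign, space, underscore or prefix).
def arr_to_num (arr : List Int) : Int :=
  (PySem.Str.join "" (arr.map PySem.Int.toStr)).toList.foldl
    (fun acc c => acc * 2 + (if c = '1' then 1 else 0)) 0

-- while idx >= 0: … ; idx -= 1   ported as a fold over the countdown range 42,…,0
def solve (N : Int) (K : Int) (As : List Int) : Int :=
  if K = 0 then func As 0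
  else
    let IDX_MAX : Int := 42
    let bits0 : List Int := List.replicate 43 0
    let bits :=
      (PySem.List.pyRange IDX_MAX (-1) (-1)).foldl (fun bits idx =>
        if arr_to_num (add_bit bits (IDX_MAX - idx)) > K then bits
        else
          let oz := As.foldl (fun (p : Int × Int) a =>
            if PySem.Int.band a ((1 : Int) <<< idx.toNat) ≠ 0 then (p.1 + 1, p.2)
            else (p.1, p.2 + 1)) (0, 0)
          if oz.1 ≥ oz.2 then PySem.List.pySetD bits (IDX_MAX - idx) 0
          else PySem.List.pySetD bits (IDX_MAX - idx) 1) bits0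
    func As (arr_to_num bits)

-- ===== PORT B =====
def solve_alt (N : Int) (K : Int) (As : List Int) : Int :=
  let n : Int := PySem.List.len As
  -- desired = [2 * sum(1 for a in As if a & (1 << b)) < n for b in range(43)]
  let desired : List Bool :=
    (PySem.List.pyRange 0 43 1).map (fun b =>
      decide (2 * As.foldl (fun s a =>
        if PySem.Int.band a ((1 : Int) <<< b.toNat) ≠ 0 then s + 1 else s) 0 < n))
  -- i = next((b for b in range(42,-1,-1) if K // 2**b % 2 == 1 and not desired[b]), None)
  let i : Option Int :=
    (PySem.List.pyRange 42 (-1) (-1)).find? (fun b =>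
      PySem.Int.mod (PySem.Int.floordiv K (2 ^ b.toNat)) 2 == 1
        && !(PySem.List.pyGetD desired b false))
  let x : Int :=
    if K ≤ 0 then 0
    else
      match i with
      | none => K
      | some i =>
          PySem.Int.floordiv K (2 ^ (i + 1).toNat) * 2 ^ (i + 1).toNat
            + (PySem.List.pyRange 0 i 1).foldl (fun s b =>
                if PySem.List.pyGetD desired b false then s + 2 ^ b.toNat else s) 0
  As.foldl (fun s a => s + PySem.Int.bxor a x) 0

-- ===== PRECONDITION & SPEC =====
def Spec_solve (N : Int) (K : Int) (As : List Int) (out : Int) : Prop := out = solve_alt N K As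
instance (N : Int) (K : Int) (As : List Int) (out : Int) : Decidable (Spec_solve N K As out) := by unfold Spec_solve; infer_instance

-- ===== CLAIM (what is proved, stated in full; the proofs are below) =====
def Claim_equal_solve : Prop := ∀ (N : Int) (K : Int) (As : List Int), Dom_solve N K As → Spec_solve N K As (solve N K As)

-- ===== LEMMAS AND PROOFS =====

-- the character str(d) produces for a digit d ∈ {0,1}
def pvDigitChar (d : Int) : Char := if d = 1 then '1' else '0'

-- the binary value of a digit list, as the fold A's hand-ported int(_,2) performs
def pvPacc (acc : Int) (l : List Int) : Int := l.foldl (fun a d => a * 2 + d) acc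

-- how many elements of As have bit b set
def pvCnt (As : List Int) (b : Nat) : Int :=
  As.foldl (fun s a => if PySem.Int.band a ((2 : Int) ^ b) ≠ 0 then s + 1 else s) 0

-- A's greedy, reduced to a plain integer accumulator
def pvG (K : Int) (As : List Int) (L : List Int) (x : Int) : Int :=
  L.foldl (fun x b =>
    if x + 2 ^ b.toNat ≤ K ∧ 2 * pvCnt As b.toNat < (As.length : Int)
    then x + 2 ^ b.toNat else x) x

lemma pvPacc_cons (acc d : Int) (l : List Int) :
    pvPacc acc (d :: l) = pvPacc (acc * 2 + d) l := rfl

lemma pvPacc_append (acc : Int) (l l' : List Int) :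
    pvPacc acc (l ++ l') = pvPacc (pvPacc acc l) l' := List.foldl_append

lemma pvPacc_replicate (j : Nat) (acc : Int) :
    pvPacc acc (List.replicate j 0) = acc * 2 ^ j := by
  induction j generalizing acc with
  | zero => simp [pvPacc]
  | succ m ih =>
      rw [List.replicate_succ, pvPacc_cons, ih]
      ring

lemma pv_arr_to_num_eq (arr : List Int) (h : ∀ d ∈ arr, d = 0 ∨ d = 1) :
    arr_to_num arr = pvPacc 0 arr := by
  unfold arr_to_num
  rw [PySem.Str.toList_join]
  have hmap : (arr.map PySem.Int.toStr).map String.toList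
      = (arr.map pvDigitChar).map (fun c => [c]) := by
    simp only [List.map_map]
    apply List.map_congr_left
    intro d hd
    rcases h d hd with h0 | h1
    · subst h0; rfl
    · subst h1; rfl
  rw [hmap]
  rw [show ("" : String).toList = [] from rfl, PySem.Chars.join_nil_singletons]
  rw [List.foldl_map]
  unfold pvPacc
  apply PySem.List.foldl_congr_mem
  intro acc d hd
  rcases h d hd with h0 | h1
  · subst h0; simp [pvDigitChar]
  · subst h1; simp [pvDigitChar]

lemma pvOz (As : List Int) (b : Nat) :
    As.foldl (fun (p : Int × Int) a =>
        if PySem.Int.band a ((2 : Int) ^ b) ≠ 0 then (p.1 + 1, p.2)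
        else (p.1, p.2 + 1)) (0, 0)
      = (pvCnt As b, (As.length : Int) - pvCnt As b) := by
  have hsplit : (fun (p : Int × Int) a =>
        if PySem.Int.band a ((2 : Int) ^ b) ≠ 0 then (p.1 + 1, p.2)
        else (p.1, p.2 + 1))
      = fun (p : Int × Int) a =>
        ((fun o a => if PySem.Int.band a ((2 : Int) ^ b) ≠ 0 then o + 1 else o) p.1 a,
         (fun z a => if ¬ (PySem.Int.band a ((2 : Int) ^ b) ≠ 0) then z + 1 else z) p.2 a) := by
    funext p a
    by_cases hc : PySem.Int.band a ((2 : Int) ^ b) ≠ 0 <;> simp [hc]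
  rw [hsplit, PySem.List.foldl_prod_mk
    (f := fun o a => if PySem.Int.band a ((2 : Int) ^ b) ≠ 0 then o + 1 else o)
    (g := fun z a => if ¬ PySem.Int.band a ((2 : Int) ^ b) ≠ 0 then z + 1 else z)]
  rw [PySem.List.foldl_ite_add_one, PySem.List.foldl_ite_add_one]
  have hlen := List.length_eq_countP_add_countP
    (l := As) (fun a => decide (PySem.Int.band a ((2 : Int) ^ b) ≠ 0))
  have hcnt : pvCnt As b
      = (As.countP (fun a => decide (PySem.Int.band a ((2 : Int) ^ b) ≠ 0)) : Int) := by
    simpa [pvCnt] using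
      PySem.List.foldl_ite_add_one (fun a => PySem.Int.band a ((2 : Int) ^ b) ≠ 0) As 0
  rw [Prod.mk.injEq]
  constructor
  · rw [hcnt]; simp
  · have : (As.countP fun a => decide ¬ PySem.Int.band a ((2 : Int) ^ b) ≠ 0)
        = (As.countP fun a => decide ¬ (decide (PySem.Int.band a ((2 : Int) ^ b) ≠ 0)) = true) := by
      apply List.countP_congr
      intro a _
      simp
    rw [this, hcnt]
    omega

lemma pvSetMid (chosen : List Int) (m : Nat) (v : Int) :
    (chosen ++ List.replicate (m + 1) 0).set chosen.length v
      = chosen ++ v :: List.replicate m 0 := by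
  induction chosen with
  | nil => rfl
  | cons h t ih => simp [ih]

-- the main correspondence: A's 0/1-array greedy equals the integer greedy pvG
set_option maxHeartbeats 1600000 in
lemma pvLoop (K : Int) (As : List Int) :
    ∀ (j : Nat) (chosen : List Int), j ≤ 43 → chosen.length = 43 - j →
      (∀ d ∈ chosen, d = 0 ∨ d = 1) →
      arr_to_num ((PySem.List.pyRange ((j : Int) - 1) (-1) (-1)).foldl (fun bits idx =>
          if arr_to_num (add_bit bits (42 - idx)) > K then bits
          else
            let oz := As.foldl (fun (p : Int × Int) a =>
              if PySem.Int.band a ((1 : Int) <<< idx.toNat) ≠ 0 then (p.1 + 1, p.2)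
              else (p.1, p.2 + 1)) (0, 0)
            if oz.1 ≥ oz.2 then PySem.List.pySetD bits (42 - idx) 0
            else PySem.List.pySetD bits (42 - idx) 1) (chosen ++ List.replicate j 0))
        = pvG K As (PySem.List.pyRange ((j : Int) - 1) (-1) (-1)) (pvPacc 0 chosen * 2 ^ j) := by
  intro j
  induction j with
  | zero =>
      intro chosen _ _ hdig
      rw [show ((0 : Nat) : Int) - 1 = (-1 : Int) by norm_num,
        PySem.List.pyRange_neg_one_eq_nil le_rfl]
      simp only [pvG, List.foldl_nil, List.replicate_zero, List.append_nil, pow_zero, mul_one]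
      exact pv_arr_to_num_eq chosen hdig
  | succ m ih =>
      intro chosen hj hlen hdig
      have hm : m ≤ 42 := by omega
      have hlen' : chosen.length = 42 - m := by omega
      have htn : ((m : Int)).toNat = m := Int.toNat_natCast m
      simp only [pvG, Int.shiftLeft_eq, one_mul] at ih ⊢
      rw [show ((m + 1 : Nat) : Int) - 1 = (m : Int) by omega,
        PySem.List.pyRange_neg_one_cons (by omega : (-1 : Int) < (m : Int))]
      simp only [List.foldl_cons, htn]
      -- A's head step
      have hidx : (42 : Int) - (m : Int) = (chosen.length : Int) := by omega
      have hdig1 : ∀ d ∈ chosen ++ (1 : Int) :: List.replicate m 0, d = 0 ∨ d = 1 := by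
        intro d hd
        rcases List.mem_append.1 hd with hd | hd
        · exact hdig d hd
        · rcases List.mem_cons.1 hd with hd | hd
          · right; exact hd
          · left; exact List.eq_of_mem_replicate hd
      have hdig0 : ∀ (v : Int), v = 0 ∨ v = 1 → ∀ d ∈ chosen ++ [v], d = 0 ∨ d = 1 := by
        intro v hv d hd
        rcases List.mem_append.1 hd with hd | hd
        · exact hdig d hd
        · rcases List.mem_singleton.1 hd with rfl; exact hv
      have habit : arr_to_num (add_bit (chosen ++ List.replicate (m + 1) 0) (42 - (m : Int)))
          = (pvPacc 0 chosen * 2 + 1) * 2 ^ m := by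
        rw [hidx]
        unfold add_bit
        rw [PySem.List.pySetD_natCast, pvSetMid]
        rw [pv_arr_to_num_eq _ hdig1]
        rw [show chosen ++ (1 : Int) :: List.replicate m 0
            = (chosen ++ [1]) ++ List.replicate m 0 by simp]
        rw [pvPacc_append, pvPacc_append, pvPacc_replicate]
        rfl
      have hoz := pvOz As m
      rw [habit, hoz]
      dsimp only
      have hx : (pvPacc 0 chosen * 2 + 1) * 2 ^ m
          = pvPacc 0 chosen * 2 ^ (m + 1) + 2 ^ m := by ring
      by_cases hgt : (pvPacc 0 chosen * 2 + 1) * 2 ^ m > K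
      · rw [if_pos hgt, if_neg (by rintro ⟨hle, -⟩; omega)]
        have hIH := ih (chosen ++ [0]) (by omega) (by simp; omega) (hdig0 0 (Or.inl rfl))
        rw [show chosen ++ List.replicate (m + 1) 0
            = (chosen ++ [0]) ++ List.replicate m 0 by
          rw [List.replicate_succ]; simp]
        rw [hIH, pvPacc_append]
        congr 1
        rw [show pvPacc (pvPacc 0 chosen) [0] = pvPacc 0 chosen * 2 + 0 from rfl]
        ring
      · rw [if_neg hgt]
        by_cases hcl : 2 * pvCnt As m < (As.length : Int)
        · -- bit is affordable and zeros outnumber ones: both set it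
          have hcond : ¬ (pvCnt As m ≥ (As.length : Int) - pvCnt As m) := by omega
          rw [if_neg hcond, if_pos ⟨by omega, hcl⟩]
          rw [hidx, PySem.List.pySetD_natCast, pvSetMid]
          have hIH := ih (chosen ++ [1]) (by omega) (by simp; omega) (hdig0 1 (Or.inr rfl))
          rw [show chosen ++ (1 : Int) :: List.replicate m 0
              = (chosen ++ [1]) ++ List.replicate m 0 by simp]
          rw [hIH, pvPacc_append]
          congr 1
        · have hcond : pvCnt As m ≥ (As.length : Int) - pvCnt As m := by omega
          rw [if_pos hcond, if_neg (by rintro ⟨-, hc⟩; omega)]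
          rw [hidx, PySem.List.pySetD_natCast, pvSetMid]
          have hIH := ih (chosen ++ [0]) (by omega) (by simp; omega) (hdig0 0 (Or.inl rfl))
          rw [show chosen ++ (0 : Int) :: List.replicate m 0
              = (chosen ++ [0]) ++ List.replicate m 0 by simp]
          rw [hIH, pvPacc_append]
          congr 1
          rw [show pvPacc (pvPacc 0 chosen) [0] = pvPacc 0 chosen * 2 + 0 from rfl]
          ring

def pvHi (k j : Nat) : Nat := k / 2 ^ j * 2 ^ j

def pvSN (As : List Int) (j i : Nat) : Nat :=
  ∑ b ∈ Finset.Ico j i, (if 2 * pvCnt As b < (As.length : Int) then 2 ^ b else 0)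

def pvX (As : List Int) (k ip j : Nat) : Int :=
  ((pvHi k (max j ip) + pvSN As j (ip - 1) : Nat) : Int)

lemma pvSplit (k j : Nat) :
    pvHi k j = pvHi k (j + 1) + (k / 2 ^ j % 2) * 2 ^ j := by
  have h1 : k / 2 ^ (j + 1) = k / 2 ^ j / 2 := by
    rw [Nat.div_div_eq_div_mul, pow_succ]
  have h2 := Nat.div_add_mod (k / 2 ^ j) 2
  calc pvHi k j = (2 * (k / 2 ^ j / 2) + k / 2 ^ j % 2) * 2 ^ j := by
        unfold pvHi; rw [h2]
    _ = (k / 2 ^ j / 2) * 2 ^ (j + 1) + (k / 2 ^ j % 2) * 2 ^ j := by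
        rw [pow_succ]; ring
    _ = _ := by unfold pvHi; rw [h1]

lemma pvHiLe (k j : Nat) : pvHi k j ≤ k := Nat.div_mul_le_self k (2 ^ j)

lemma pvHiLt (k j : Nat) : k < pvHi k j + 2 ^ j :=
  Nat.lt_div_mul_add (by positivity)

lemma pvSN_empty (As : List Int) (j i : Nat) (h : i ≤ j) : pvSN As j i = 0 := by
  unfold pvSN
  rw [Finset.Ico_eq_empty (by omega), Finset.sum_empty]

lemma pvSN_bot (As : List Int) (j i : Nat) (h : j < i) :
    pvSN As j i = (if 2 * pvCnt As j < (As.length : Int) then 2 ^ j else 0) + pvSN As (j + 1) i := by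
  unfold pvSN
  rw [Finset.sum_eq_sum_Ico_succ_bot h]

lemma pvSN_bound (As : List Int) (a : Nat) :
    ∀ i : Nat, a ≤ i → pvSN As a i + 2 ^ a ≤ 2 ^ i := by
  intro i
  induction i with
  | zero =>
      intro h
      have ha : a = 0 := by omega
      subst ha
      rw [pvSN_empty As 0 0 le_rfl]
      norm_num
  | succ m ih =>
      intro h
      rcases Nat.lt_or_ge a (m + 1) with hlt | hge
      · have ham : a ≤ m := by omega
        have hs : pvSN As a (m + 1) = pvSN As a m
            + (if 2 * pvCnt As m < (As.length : Int) then 2 ^ m else 0) := by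
          unfold pvSN
          rw [Finset.sum_Ico_succ_top ham]
        have hb := ih ham
        have hp : (2:Nat) ^ (m + 1) = 2 * 2 ^ m := by rw [pow_succ]; ring
        have hite : (if 2 * pvCnt As m < (As.length : Int) then (2:Nat) ^ m else 0) ≤ 2 ^ m := by
          split <;> omega
        omega
      · rw [pvSN_empty As a (m + 1) hge]
        simpa using Nat.pow_le_pow_right (by norm_num) h

lemma pvG_main (As : List Int) (k ip : Nat)
    (hip : ip = 0 ∨ (1 ≤ ip ∧ k / 2 ^ (ip - 1) % 2 = 1 ∧ ¬ 2 * pvCnt As (ip - 1) < (As.length : Int)))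
    (hup : ∀ b : Nat, ip ≤ b → b < 43 → k / 2 ^ b % 2 = 1 → 2 * pvCnt As b < (As.length : Int)) :
    ∀ j : Nat, j ≤ 43 →
      pvG (k : Int) As (PySem.List.pyRange ((j : Int) - 1) (-1) (-1)) (pvX As k ip j)
        = pvX As k ip 0 := by
  intro j
  induction j with
  | zero =>
      intro _
      rw [show ((0 : Nat) : Int) - 1 = (-1 : Int) by norm_num,
        PySem.List.pyRange_neg_one_eq_nil le_rfl]
      rfl
  | succ m ih =>
      intro hm
      have htn : ((m : Int)).toNat = m := Int.toNat_natCast m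
      rw [show ((m + 1 : Nat) : Int) - 1 = (m : Int) by omega,
        PySem.List.pyRange_neg_one_cons (by omega : (-1 : Int) < (m : Int))]
      unfold pvG
      rw [List.foldl_cons]
      have hstep : (if pvX As k ip (m + 1) + 2 ^ ((m : Int)).toNat ≤ (k : Int)
              ∧ 2 * pvCnt As ((m : Int)).toNat < (As.length : Int)
          then pvX As k ip (m + 1) + 2 ^ ((m : Int)).toNat else pvX As k ip (m + 1))
          = pvX As k ip m := by
        rw [htn]
        have hp2 : (0:Nat) < 2 ^ m := by positivity
        have hps : (2:Nat) ^ (m + 1) = 2 * 2 ^ m := by rw [pow_succ]; ring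
        have hcast : ((2:Nat) ^ m : Int) = (2:Int) ^ m := by push_cast; ring
        rcases Nat.lt_or_ge m ip with hmi | hmi
        · -- m < ip : pivot bit or free phase
          rcases Nat.lt_or_ge (m + 1) ip with hmi2 | hmi2
          · -- free phase: m + 1 < ip, i.e. m < ip - 1
            have h1 : max (m + 1) ip = ip := by omega
            have h0 : max m ip = ip := by omega
            obtain ⟨hip1, hbit, hcond⟩ : 1 ≤ ip ∧ k / 2 ^ (ip - 1) % 2 = 1
                ∧ ¬ 2 * pvCnt As (ip - 1) < (As.length : Int) := by
              rcases hip with h | h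
              · omega
              · exact h
            -- k ≥ pvHi k ip + 2^(ip-1)
            have hsp := pvSplit k (ip - 1)
            rw [show ip - 1 + 1 = ip by omega, hbit, one_mul] at hsp
            have hle := pvHiLe k (ip - 1)
            -- sum bound
            have hsb := pvSN_bound As (m + 1) (ip - 1) (by omega)
            have hpm1 : (2:Nat) ^ (ip - 1) ≥ 2 ^ (m + 1) := Nat.pow_le_pow_right (by norm_num) (by omega)
            by_cases hc : 2 * pvCnt As m < (As.length : Int)
            · have hafford : pvHi k ip + pvSN As (m + 1) (ip - 1) + 2 ^ m ≤ k := by omega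
              rw [if_pos]
              · unfold pvX
                rw [h1, h0, pvSN_bot As m (ip - 1) (by omega), if_pos hc]
                push_cast
                ring
              · constructor
                · unfold pvX
                  rw [h1, ← hcast]
                  exact_mod_cast hafford
                · exact hc
            · rw [if_neg (by rintro ⟨-, hcc⟩; exact hc hcc)]
              unfold pvX
              rw [h1, h0, pvSN_bot As m (ip - 1) (by omega), if_neg hc, zero_add]
          · -- pivot bit: m + 1 = ip
            have hmeq : m = ip - 1 := by omega
            obtain ⟨hip1, hbit, hcond⟩ : 1 ≤ ip ∧ k / 2 ^ (ip - 1) % 2 = 1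
                ∧ ¬ 2 * pvCnt As (ip - 1) < (As.length : Int) := by
              rcases hip with h | h
              · omega
              · exact h
            rw [if_neg (by rintro ⟨-, hcc⟩; rw [hmeq] at hcc; exact hcond hcc)]
            unfold pvX
            rw [show max (m + 1) ip = ip by omega, show max m ip = ip by omega,
              pvSN_empty As (m + 1) (ip - 1) (by omega), pvSN_empty As m (ip - 1) (by omega)]
        · -- tight phase: ip ≤ m
          have h1 : max (m + 1) ip = m + 1 := by omega
          have h0 : max m ip = m := by omega
          have hsp := pvSplit k m
          have hle := pvHiLe k m
          have hlt := pvHiLt k m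
          have hm2 : k / 2 ^ m % 2 < 2 := Nat.mod_lt _ (by norm_num)
          by_cases hbit : k / 2 ^ m % 2 = 1
          · have hc := hup m hmi (by omega) hbit
            rw [hbit, one_mul] at hsp
            rw [if_pos]
            · unfold pvX
              rw [h1, h0, pvSN_empty As (m + 1) (ip - 1) (by omega),
                pvSN_empty As m (ip - 1) (by omega), hsp]
              push_cast
              ring
            · constructor
              · unfold pvX
                rw [h1, pvSN_empty As (m + 1) (ip - 1) (by omega), ← hcast]
                have : pvHi k (m + 1) + 2 ^ m ≤ k := by omega
                exact_mod_cast this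
              · exact hc
          · have hbit0 : k / 2 ^ m % 2 = 0 := by omega
            rw [hbit0, zero_mul, add_zero] at hsp
            rw [if_neg]
            · unfold pvX
              rw [h1, h0, pvSN_empty As (m + 1) (ip - 1) (by omega),
                pvSN_empty As m (ip - 1) (by omega), hsp]
            · rintro ⟨hcc, -⟩
              unfold pvX at hcc
              rw [h1, pvSN_empty As (m + 1) (ip - 1) (by omega), ← hcast] at hcc
              have hcc' : pvHi k (m + 1) + 2 ^ m ≤ k := by exact_mod_cast hcc
              omega
      rw [hstep]
      exact ih (by omega)

def pvDesired (As : List Int) : List Bool :=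
  (PySem.List.pyRange 0 43 1).map (fun b =>
    decide (2 * As.foldl (fun s a =>
      if PySem.Int.band a ((1 : Int) <<< b.toNat) ≠ 0 then s + 1 else s) 0 < PySem.List.len As))

lemma pvDesired_get (As : List Int) (b : Int) (h0 : 0 ≤ b) (h1 : b < 43) :
    PySem.List.pyGetD (pvDesired As) b false
      = decide (2 * pvCnt As b.toNat < (As.length : Int)) := by
  unfold pvDesired
  rw [PySem.List.pyGetD_map_pyRange_of_nonneg _ 43 b false h0 h1]
  simp only [Int.shiftLeft_natCast_right, Int.shiftLeft_eq, one_mul, PySem.List.len_eq]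
  rfl

lemma pvG_zero (K : Int) (As : List Int) (hK : K ≤ 0) :
    ∀ L : List Int, pvG K As L 0 = 0 := by
  intro L
  induction L with
  | nil => rfl
  | cons b t ih =>
      unfold pvG at ih ⊢
      rw [List.foldl_cons, if_neg]
      · exact ih
      · rintro ⟨hle, -⟩
        have : (0:Int) < 2 ^ b.toNat := by positivity
        omega

lemma pvFind_none (p : Int → Bool) (m : Nat)
    (h : (PySem.List.pyRange (m : Int) (-1) (-1)).find? p = none) :
    ∀ b : Int, 0 ≤ b → b ≤ m → p b = false := by
  intro b h0 h1
  have hmem : b ∈ PySem.List.pyRange (m : Int) (-1) (-1) :=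
    (PySem.List.mem_pyRange_neg_one).mpr ⟨by omega, h1⟩
  have := List.find?_eq_none.mp h b hmem
  simpa using this

lemma pvFind_some (p : Int → Bool) : ∀ (m : Nat) (i : Int),
    (PySem.List.pyRange (m : Nat) (-1) (-1)).find? p = some i →
    0 ≤ i ∧ i ≤ m ∧ p i = true ∧ ∀ b : Int, i < b → b ≤ m → p b = false := by
  intro m
  induction m with
  | zero =>
      intro i h
      rw [PySem.List.pyRange_neg_one_cons (by norm_num),
        show ((0:Nat):Int) - 1 = (-1:Int) by norm_num,
        PySem.List.pyRange_neg_one_eq_nil le_rfl] at h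
      by_cases hp : p ((0:Nat):Int)
      · rw [List.find?_cons_of_pos hp] at h
        obtain rfl : ((0:Nat):Int) = i := by injection h
        exact ⟨le_rfl, le_rfl, hp, by intro b hb hb'; omega⟩
      · rw [List.find?_cons_of_neg (by simpa using hp)] at h
        simp at h
  | succ n ih =>
      intro i h
      rw [PySem.List.pyRange_neg_one_cons (by push_cast; omega),
        show ((n+1:Nat):Int) - 1 = ((n:Nat):Int) by push_cast; ring] at h
      by_cases hp : p ((n+1:Nat):Int)
      · rw [List.find?_cons_of_pos hp] at h
        obtain rfl : ((n+1:Nat):Int) = i := by injection h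
        refine ⟨by positivity, le_rfl, hp, ?_⟩
        intro b hb hb'
        omega
      · rw [List.find?_cons_of_neg (by simpa using hp)] at h
        obtain ⟨h0, h1, h2, h3⟩ := ih i h
        refine ⟨h0, by omega, h2, ?_⟩
        intro b hb hb'
        rcases eq_or_lt_of_le hb' with rfl | hlt
        · simpa using hp
        · exact h3 b hb (by omega)

lemma pvPred_eq (As : List Int) (K : Int) (k : Nat) (hk : K = (k : Int))
    (b : Int) (h0 : 0 ≤ b) (h1 : b < 43) :
    (PySem.Int.mod (PySem.Int.floordiv K (2 ^ b.toNat)) 2 == 1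
        && !(PySem.List.pyGetD (pvDesired As) b false))
      = (decide (k / 2 ^ b.toNat % 2 = 1)
        && !decide (2 * pvCnt As b.toNat < (As.length : Int))) := by
  rw [pvDesired_get As b h0 h1, hk]
  congr 1
  have h2 : (2:Int) ^ b.toNat = ((2 ^ b.toNat : Nat) : Int) := by push_cast; ring
  rw [h2, PySem.Int.floordiv_natCast, show (2:Int) = ((2:Nat):Int) from rfl,
    PySem.Int.mod_natCast]
  rcases Nat.mod_two_eq_zero_or_one (k / 2 ^ b.toNat) with h | h <;> rw [h] <;> simp

lemma pvFoldS (As : List Int) : ∀ m : Nat, m ≤ 43 →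
    (PySem.List.pyRange 0 (m : Int) 1).foldl (fun s b =>
        if PySem.List.pyGetD (pvDesired As) b false then s + 2 ^ b.toNat else s) 0
      = ((pvSN As 0 m : Nat) : Int) := by
  intro m
  induction m with
  | zero =>
      intro _
      rw [show ((0:Nat):Int) = (0:Int) by norm_num, PySem.List.pyRange_one_eq_nil le_rfl,
        pvSN_empty As 0 0 le_rfl]
      rfl
  | succ n ih =>
      intro h
      rw [show ((n+1:Nat):Int) = ((n:Nat):Int) + 1 by push_cast; ring,
        PySem.List.pyRange_one_succ_right (by positivity), List.foldl_append, ih (by omega)]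
      have hsum : pvSN As 0 (n + 1) = pvSN As 0 n
          + (if 2 * pvCnt As n < (As.length : Int) then 2 ^ n else 0) := by
        unfold pvSN
        rw [Finset.sum_Ico_succ_top (Nat.zero_le n)]
      rw [List.foldl_cons, List.foldl_nil, pvDesired_get As ((n:Nat):Int) (by positivity) (by exact_mod_cast h),
        Int.toNat_natCast, hsum]
      by_cases hc : 2 * pvCnt As n < (As.length : Int)
      · rw [if_pos (by simpa using hc), if_pos hc]
        push_cast
        ring
      · rw [if_neg (by simpa using hc), if_neg hc]
        push_cast
        ring

set_option maxHeartbeats 800000 in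
lemma pvXeq (K : Int) (As : List Int) (hbound : K ≤ 2147483648) :
    pvG K As (PySem.List.pyRange 42 (-1) (-1)) 0
      = (if K ≤ 0 then 0 else
          match (PySem.List.pyRange 42 (-1) (-1)).find? (fun b =>
              PySem.Int.mod (PySem.Int.floordiv K (2 ^ b.toNat)) 2 == 1
                && !(PySem.List.pyGetD (pvDesired As) b false)) with
          | none => K
          | some i => PySem.Int.floordiv K (2 ^ (i + 1).toNat) * 2 ^ (i + 1).toNat
              + (PySem.List.pyRange 0 i 1).foldl (fun s b =>
                  if PySem.List.pyGetD (pvDesired As) b false then s + 2 ^ b.toNat else s) 0) := by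
  by_cases hKle : K ≤ 0
  · rw [if_pos hKle, pvG_zero K As hKle]
  · rw [if_neg hKle]
    have hk0 : (0:Int) ≤ K := by omega
    have hk : K = (K.toNat : Int) := (Int.toNat_of_nonneg hk0).symm
    set k := K.toNat with hkdef
    have hk43 : k < 2 ^ 43 := by
      have h1 : (2147483648 : Nat) < 2 ^ 43 := by norm_num
      omega
    have hr42 : ((42:Nat):Int) = (42:Int) := by norm_num
    rcases hfind : (PySem.List.pyRange 42 (-1) (-1)).find? (fun b =>
        PySem.Int.mod (PySem.Int.floordiv K (2 ^ b.toNat)) 2 == 1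
          && !(PySem.List.pyGetD (pvDesired As) b false)) with _ | i
    · rw [hfind]
      show pvG K As (PySem.List.pyRange 42 (-1) (-1)) 0 = K
      have hnone := pvFind_none _ 42 (by rw [hr42]; exact hfind)
      have hup : ∀ b : Nat, 0 ≤ b → b < 43 → k / 2 ^ b % 2 = 1
          → 2 * pvCnt As b < (As.length : Int) := by
        intro b _ hb hbit
        have hh := hnone ((b:Nat):Int) (by positivity) (by exact_mod_cast Nat.lt_succ_iff.mp hb)
        rw [pvPred_eq As K k hk ((b:Nat):Int) (by positivity) (by exact_mod_cast hb),
          Int.toNat_natCast] at hh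
        simp only [Bool.and_eq_false_iff, decide_eq_false_iff_not, Bool.not_eq_false',
          decide_eq_true_eq] at hh
        rcases hh with hh | hh
        · exact absurd hbit hh
        · exact hh
      have hmain := pvG_main As k 0 (Or.inl rfl) hup 43 le_rfl
      have hX43 : pvX As k 0 43 = 0 := by
        unfold pvX pvHi
        rw [show max 43 0 = 43 by omega, Nat.div_eq_of_lt hk43, pvSN_empty As 43 0 (by omega)]
        norm_num
      have hX0 : pvX As k 0 0 = K := by
        unfold pvX pvHi
        rw [show max 0 0 = 0 by omega, pvSN_empty As 0 0 le_rfl, pow_zero, Nat.div_one,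
          mul_one, add_zero, ← hk]
      rw [show ((43:Nat):Int) - 1 = (42:Int) by norm_num, hX43, hX0] at hmain
      rw [hk] at hmain ⊢
      exact hmain
    · rw [hfind]
      show pvG K As (PySem.List.pyRange 42 (-1) (-1)) 0
        = PySem.Int.floordiv K (2 ^ (i + 1).toNat) * 2 ^ (i + 1).toNat
          + (PySem.List.pyRange 0 i 1).foldl (fun s b =>
              if PySem.List.pyGetD (pvDesired As) b false then s + 2 ^ b.toNat else s) 0
      obtain ⟨h0, h42, hpi, hafter⟩ := pvFind_some _ 42 i (by rw [hr42]; exact hfind)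
      rw [hr42] at h42
      set it := i.toNat with hitdef
      have hi : i = (it : Int) := (Int.toNat_of_nonneg h0).symm
      rw [pvPred_eq As K k hk i h0 (by omega)] at hpi
      simp only [Bool.and_eq_true, decide_eq_true_eq, Bool.not_eq_true',
        decide_eq_false_iff_not] at hpi
      obtain ⟨hbit, hcond⟩ := hpi
      have hup : ∀ b : Nat, it + 1 ≤ b → b < 43 → k / 2 ^ b % 2 = 1
          → 2 * pvCnt As b < (As.length : Int) := by
        intro b hb1 hb2 hbit'
        have hh := hafter ((b:Nat):Int) (by omega) (by exact_mod_cast Nat.lt_succ_iff.mp hb2)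
        rw [pvPred_eq As K k hk ((b:Nat):Int) (by positivity) (by exact_mod_cast hb2),
          Int.toNat_natCast] at hh
        simp only [Bool.and_eq_false_iff, decide_eq_false_iff_not, Bool.not_eq_false',
          decide_eq_true_eq] at hh
        rcases hh with hh | hh
        · exact absurd hbit' hh
        · exact hh
      have hip : it + 1 = 0 ∨ (1 ≤ it + 1 ∧ k / 2 ^ (it + 1 - 1) % 2 = 1
          ∧ ¬ 2 * pvCnt As (it + 1 - 1) < (As.length : Int)) := by
        right
        refine ⟨by omega, ?_, ?_⟩ <;> rw [show it + 1 - 1 = it by omega] <;> assumption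
      have hmain := pvG_main As k (it + 1) hip hup 43 le_rfl
      have hit42 : it ≤ 42 := by omega
      have hX43 : pvX As k (it + 1) 43 = 0 := by
        unfold pvX pvHi
        rw [show max 43 (it + 1) = 43 by omega, Nat.div_eq_of_lt hk43,
          pvSN_empty As 43 (it + 1 - 1) (by omega)]
        norm_num
      have hX0 : pvX As k (it + 1) 0 = ((pvHi k (it + 1) + pvSN As 0 it : Nat) : Int) := by
        unfold pvX
        rw [show max 0 (it + 1) = it + 1 by omega, show it + 1 - 1 = it by omega]
      rw [show ((43:Nat):Int) - 1 = (42:Int) by norm_num, hX43, hX0] at hmain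
      have htn1 : (i + 1).toNat = it + 1 := by omega
      have hfd : PySem.Int.floordiv K ((2:Int) ^ (i + 1).toNat) * (2:Int) ^ (i + 1).toNat
          = ((pvHi k (it + 1) : Nat) : Int) := by
        rw [htn1, hk, show (2:Int) ^ (it + 1) = ((2 ^ (it + 1) : Nat) : Int) by push_cast; ring,
          PySem.Int.floordiv_natCast]
        unfold pvHi
        push_cast
        ring
      rw [hfd, hi, pvFoldS As it (by omega), hk]
      rw [hmain]
      push_cast
      ring


lemma pvAltEq (N K : Int) (As : List Int) (hbound : K ≤ 2147483648) :
    As.foldl (fun s a =>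
        s + PySem.Int.bxor a (pvG K As (PySem.List.pyRange 42 (-1) (-1)) 0)) 0
      = solve_alt N K As := by
  have hx := pvXeq K As hbound
  show _ = As.foldl (fun s a =>
      s + PySem.Int.bxor a (if K ≤ 0 then 0 else
        match (PySem.List.pyRange 42 (-1) (-1)).find? (fun b =>
            PySem.Int.mod (PySem.Int.floordiv K (2 ^ b.toNat)) 2 == 1
              && !(PySem.List.pyGetD (pvDesired As) b false)) with
        | none => K
        | some i => PySem.Int.floordiv K (2 ^ (i + 1).toNat) * 2 ^ (i + 1).toNat
            + (PySem.List.pyRange 0 i 1).foldl (fun s b =>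
                if PySem.List.pyGetD (pvDesired As) b false then s + 2 ^ b.toNat else s) 0)) 0
  rw [hx]

-- ===== VERDICT (by name: the statement is the Claim_ definition above) =====
theorem solve_spec : Claim_equal_solve := by
  intro N K As hdom
  have hbound : K ≤ 2147483648 := by
    simp only [Dom_solve, Bool.and_eq_true, pvDomInt, decide_eq_true_eq] at hdom
    exact hdom.1.2.2
  show solve N K As = solve_alt N K As
  by_cases hK0 : K = 0
  · rw [solve, if_pos hK0, ← pvAltEq N K As hbound,
      pvG_zero K As (le_of_eq hK0) (PySem.List.pyRange 42 (-1) (-1))]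
    rfl
  · have h := pvLoop K As 43 [] le_rfl rfl (by intro d hd; cases hd)
    simp only [List.nil_append, show ((43:Nat):Int) - 1 = (42:Int) by norm_num, pvPacc,
      List.foldl_nil, zero_mul] at h
    rw [solve, if_neg hK0]
    calc (let IDX_MAX : Int := 42
          let bits0 : List Int := List.replicate 43 0
          let bits :=
            (PySem.List.pyRange IDX_MAX (-1) (-1)).foldl (fun bits idx =>
              if arr_to_num (add_bit bits (IDX_MAX - idx)) > K then bits
              else
                let oz := As.foldl (fun (p : Int × Int) a =>
                  if PySem.Int.band a ((1 : Int) <<< idx.toNat) ≠ 0 then (p.1 + 1, p.2)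
                  else (p.1, p.2 + 1)) (0, 0)
                if oz.1 ≥ oz.2 then PySem.List.pySetD bits (IDX_MAX - idx) 0
                else PySem.List.pySetD bits (IDX_MAX - idx) 1) bits0
          func As (arr_to_num bits))
        = func As (pvG K As (PySem.List.pyRange 42 (-1) (-1)) 0) := by
          show func As (arr_to_num ((PySem.List.pyRange 42 (-1) (-1)).foldl (fun bits idx =>
              if arr_to_num (add_bit bits (42 - idx)) > K then bits
              else
                let oz := As.foldl (fun (p : Int × Int) a =>
                  if PySem.Int.band a ((1 : Int) <<< idx.toNat) ≠ 0 then (p.1 + 1, p.2)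
                  else (p.1, p.2 + 1)) (0, 0)
                if oz.1 ≥ oz.2 then PySem.List.pySetD bits (42 - idx) 0
                else PySem.List.pySetD bits (42 - idx) 1) (List.replicate 43 0))) = _
          rw [h]
      _ = solve_alt N K As := by rw [← pvAltEq N K As hbound]; rfl
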